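-- pv_equiv track=rewrite | github.com/onegood07/python_basics_workout | String/07_UbbiDubbi.py | upper_ubbi_dubbi
-- ===== SOURCE A (Python) =====
-- def upper_ubbi_dubbi(words):
--     if words[0].isupper() and words[1:].islower(): # 대문자화인지 확인, if문 and 사용
--         word_list = []
--
--         for word in words:
--             if word in 'aeiouAEIOU': # 한 글자씩 모음인지 확인. (주의) 대문자 모음도 확인해야함
--                 lower_word = word.lower() # 대문자 -> 소문자 전환
--                 word_list.append(f"ub{lower_word}") # 우비두비 적용
--             else:
--                 word_list.append(word)
--
--         output_word = ''.join(word_list) # 리스트 형식을 문자열로 변환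
--
--         if output_word[0].islower(): # 문자열의 첫 글자가 소문자일 경우
--             return output_word[0].upper() + output_word[1:] # 대문자인 첫 글자 + 나머지 소문자 return
--
--         return output_word
--
--     else: # 입력된 단어가 대문자화가 아닌 경우
--        return "여긴 대문자화만 처리하니 이 우비두비 말고 다른 우비두비를 찾아보세요."
-- ===== SOURCE B (Python) =====
-- def upper_ubbi_dubbi(words):
--     if words[0].isupper() and words[1:].islower():
--         s = words.lower()
--         # staged textual rewriting: one replace pass per vowel; 'u' first so the
--         # inserted 'ub' prefixes are never rewritten again
--         for v in 'uaeio':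
--             s = s.replace(v, 'ub' + v)
--         return s[0].upper() + s[1:]
--     else:
--         return "여긴 대문자화만 처리하니 이 우비두비 말고 다른 우비두비를 찾아보세요."
-- ===== Notes on version B (the rewrite author's own statement) =====
-- stated objective: alternative
-- what changed: B lowercases the word once, then applies five staged whole-string replace passes (one per vowel, 'u' first so inserted 'ub' prefixes are never rewritten) and capitalizes the first character unconditionally, instead of A's single character-by-character loop that builds a list with per-character lowering and a conditional re-capitalization.
-- outside the precondition, e.g. on upper_ubbi_dubbi(''): A raises IndexError, B raises IndexError
import Mathlib
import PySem

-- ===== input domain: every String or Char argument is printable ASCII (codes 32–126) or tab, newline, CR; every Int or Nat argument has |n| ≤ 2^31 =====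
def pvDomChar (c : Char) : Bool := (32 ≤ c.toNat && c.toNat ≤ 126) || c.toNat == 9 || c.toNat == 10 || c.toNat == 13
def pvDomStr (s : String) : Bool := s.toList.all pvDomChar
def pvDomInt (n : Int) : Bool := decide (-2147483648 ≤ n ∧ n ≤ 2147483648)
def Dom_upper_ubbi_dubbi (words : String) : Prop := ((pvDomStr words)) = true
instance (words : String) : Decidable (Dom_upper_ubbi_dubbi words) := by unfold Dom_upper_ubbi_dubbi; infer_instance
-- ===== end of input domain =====

-- B replaces A's character-by-character list-building loop (with per-character lowering and a
-- conditional re-capitalization) by five staged whole-string replace passes over the lowered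
-- word, one per vowel with 'u' first, plus one unconditional capitalization; objective: alternative.


-- ===== PORT A =====
-- hand port of Python str.islower() (no PySem primitive): at least one cased character and
-- every cased character lowercase; exact on ASCII, where the cased characters are the letters
def pyStrIslower (cs : List Char) : Bool :=
  cs.any PySem.Chars.isalpha && cs.all (fun c => !PySem.Chars.isalpha c || PySem.Chars.islower c)

def upper_ubbi_dubbi (words : String) : String :=
  match words.toList with
  | [] => ""   -- Python raises IndexError on words[0]; excluded by Pre_
  | c :: rest =>
    -- words[0].isupper() and words[1:].islower()
    if PySem.Chars.isupper c && pyStrIslower (PySem.List.slice (c :: rest) (some 1) none) then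
      let word_list : List (List Char) :=
        (c :: rest).foldl (fun acc w =>
          if PySem.Chars.isIn [w] "aeiouAEIOU".toList then
            acc ++ [['u', 'b', PySem.Chars.lowerChar w]]
          else
            acc ++ [[w]]) []
      let output_word := PySem.Chars.join [] word_list
      match output_word with
      | [] => String.ofList output_word   -- unreachable: output_word is nonempty here
      | o :: os =>
        if PySem.Chars.islower o then String.ofList (PySem.Chars.upperChar o :: os)
        else String.ofList (o :: os)
    else "여긴 대문자화만 처리하니 이 우비두비 말고 다른 우비두비를 찾아보세요."

-- ===== PORT B =====
def upper_ubbi_dubbi_alt (words : String) : String :=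
  match words.toList with
  | [] => ""   -- Python raises IndexError on words[0]; excluded by Pre_
  | c :: rest =>
    -- same guard line as A: words[0].isupper() and words[1:].islower()
    if PySem.Chars.isupper c && pyStrIslower (PySem.List.slice (c :: rest) (some 1) none) then
      -- s = words.lower(); for v in 'uaeio': s = s.replace(v, 'ub' + v)
      let s := ['u', 'a', 'e', 'i', 'o'].foldl
        (fun t v => PySem.Chars.replace t [v] ['u', 'b', v])
        (PySem.Chars.lower (c :: rest))
      -- return s[0].upper() + s[1:]
      match s with
      | [] => String.ofList s   -- unreachable: s is nonempty here
      | o :: os => String.ofList (PySem.Chars.upperChar o :: os)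
    else "여긴 대문자화만 처리하니 이 우비두비 말고 다른 우비두비를 찾아보세요."

-- ===== PRECONDITION & SPEC =====
-- Pre_ excludes only the empty string, on which A raises IndexError (words[0])
def Pre_upper_ubbi_dubbi (words : String) : Prop := words ≠ ""
instance (words : String) : Decidable (Pre_upper_ubbi_dubbi words) := by unfold Pre_upper_ubbi_dubbi; infer_instance
def pvWitness_upper_ubbi_dubbi : String := "Hello"

def Spec_upper_ubbi_dubbi (words : String) (out : String) : Prop := out = upper_ubbi_dubbi_alt words
instance (words : String) (out : String) : Decidable (Spec_upper_ubbi_dubbi words out) := by unfold Spec_upper_ubbi_dubbi; infer_instance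

-- ===== CLAIM (what is proved, stated in full; the proofs are below) =====
def Claim_equal_upper_ubbi_dubbi : Prop := ∀ (words : String), Dom_upper_ubbi_dubbi words → Pre_upper_ubbi_dubbi words → Spec_upper_ubbi_dubbi words (upper_ubbi_dubbi words)

-- ===== LEMMAS AND PROOFS =====

-- abbreviations for the per-character transforms (proof layer only)
def fA (w : Char) : List Char :=
  if PySem.Chars.isIn [w] "aeiouAEIOU".toList then ['u', 'b', PySem.Chars.lowerChar w] else [w]
def fB (ch : Char) : List Char :=
  if PySem.Chars.isIn [ch] "aeiou".toList then ['u', 'b', ch] else [ch]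
-- one replace pass, per character
def subst (v c : Char) : List Char := if c = v then ['u', 'b', v] else [c]

theorem isIn_singleton_iff_mem (x : Char) (s : List Char) :
    PySem.Chars.isIn [x] s = true ↔ x ∈ s := by
  rw [PySem.Chars.isIn_iff_infix]; exact List.singleton_infix_iff x s

theorem toNat_bounds_of_isupper (c : Char) (h : PySem.Chars.isupper c = true) :
    65 ≤ c.toNat ∧ c.toNat ≤ 90 := by
  simpa [PySem.Chars.isupper, Char.le_def, UInt32.le_iff_toNat_le] using h

theorem islower_of_isupper (c : Char) (h : PySem.Chars.isupper c = true) :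
    PySem.Chars.islower c = false := by
  have := toNat_bounds_of_isupper c h
  simp [PySem.Chars.islower, Char.le_def, UInt32.le_iff_toNat_le]; omega

theorem lowerChar_id_of_not_upper (c : Char) (h : PySem.Chars.isupper c = false) :
    PySem.Chars.lowerChar c = c := by
  simp [PySem.Chars.lowerChar, h]

theorem toNat_ofNat_small (n : Nat) (h : n ≤ 200) : (Char.ofNat n).toNat = n := by
  unfold Char.ofNat
  split
  · simp [Char.ofNatAux]
  · exfalso; apply ‹¬ _›; constructor; omega

theorem upperChar_lowerChar (c : Char) (h : PySem.Chars.isupper c = true) :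
    PySem.Chars.upperChar (PySem.Chars.lowerChar c) = c := by
  have h2 := toNat_bounds_of_isupper c h
  have ht : (Char.ofNat (c.toNat + 32)).toNat = c.toNat + 32 :=
    toNat_ofNat_small _ (by omega)
  simp only [PySem.Chars.lowerChar, h, if_true, PySem.Chars.upperChar]
  rw [if_pos]
  · rw [ht, Nat.add_sub_cancel]; exact Char.ofNat_toNat c
  · simp [PySem.Chars.islower, Char.le_def, UInt32.le_iff_toNat_le, ht]; omega

theorem join_nil_flatten (l : List (List Char)) : PySem.Chars.join [] l = l.flatten := by
  induction l with
  | nil => rfl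
  | cons a t ih =>
    cases t with
    | nil => simp [PySem.Chars.join, List.intercalate]
    | cons b u =>
      rw [PySem.Chars.join_cons_cons, ih]
      simp

-- str.replace with a single-character pattern is the per-character substitution
theorem replace_go_single (v : Char) (new : List Char) :
    ∀ (fuel : Nat) (l acc : List Char), l.length ≤ fuel →
      PySem.Chars.replace.go [v] new fuel l acc
        = acc.reverse ++ l.flatMap (fun c => if c = v then new else [c]) := by
  intro fuel
  induction fuel with
  | zero =>
    intro l acc h
    have : l = [] := List.length_eq_zero_iff.mp (Nat.le_zero.mp h)
    subst this; simp [PySem.Chars.replace.go]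
  | succ n ih =>
    intro l acc h
    cases l with
    | nil => simp [PySem.Chars.replace.go]
    | cons c t =>
      simp only [PySem.Chars.replace.go, List.isPrefixOf, Bool.and_true]
      by_cases hc : c = v
      · subst hc
        rw [if_pos (by simp)]
        simp only [List.length_cons] at h
        rw [show List.drop [c].length (c :: t) = t from rfl, ih t _ (by omega)]
        simp
      · rw [if_neg (by simp; intro h'; exact hc h'.symm)]
        simp only [List.length_cons] at h
        rw [ih t _ (by omega)]
        simp [hc]

theorem replace_single (s : List Char) (v : Char) :
    PySem.Chars.replace s [v] ['u', 'b', v] = s.flatMap (subst v) := by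
  rw [show PySem.Chars.replace s [v] ['u', 'b', v]
        = PySem.Chars.replace.go [v] ['u', 'b', v] s.length s [] from rfl,
     replace_go_single v _ s.length s [] (le_refl _)]
  simp only [List.reverse_nil, List.nil_append]
  congr 1

-- the composed per-character effect of the five passes, on a single character
theorem comp_eq_fB (c : Char) :
    (((((subst 'u' c).flatMap (subst 'a')).flatMap (subst 'e')).flatMap
        (subst 'i')).flatMap (subst 'o')) = fB c := by
  by_cases hu : c = 'u'; · subst hu; decide
  by_cases ha : c = 'a'; · subst ha; decide
  by_cases he : c = 'e'; · subst he; decide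
  by_cases hi : c = 'i'; · subst hi; decide
  by_cases ho : c = 'o'; · subst ho; decide
  have h5 : PySem.Chars.isIn [c] ['a', 'e', 'i', 'o', 'u'] = false := by
    rw [Bool.eq_false_iff]; intro hcon
    have hm := (isIn_singleton_iff_mem c _).mp hcon
    simp at hm
    rcases hm with h1 | h1 | h1 | h1 | h1 <;> tauto
  simp [subst, fB, hu, ha, he, hi, ho, h5]

-- the five staged passes compose, per character, to fB
theorem staged_eq_flatMap (s : List Char) :
    ['u', 'a', 'e', 'i', 'o'].foldl
        (fun t v => PySem.Chars.replace t [v] ['u', 'b', v]) s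
      = s.flatMap fB := by
  simp only [List.foldl_cons, List.foldl_nil, replace_single]
  induction s with
  | nil => simp
  | cons c t ih =>
    simp only [List.flatMap_cons, List.flatMap_append, ih]
    congr 1
    exact comp_eq_fB c

theorem fA_eq_fB_of_not_upper (x : Char) (h : PySem.Chars.isupper x = false) : fA x = fB x := by
  unfold fA fB
  rw [lowerChar_id_of_not_upper x h]
  by_cases hx : x ∈ "aeiou".toList
  · rw [if_pos ((isIn_singleton_iff_mem x _).mpr (by simp at hx ⊢; tauto)),
        if_pos ((isIn_singleton_iff_mem x _).mpr hx)]
  · have h5 : PySem.Chars.isIn [x] "aeiou".toList = false := by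
      rw [Bool.eq_false_iff]; intro hc; exact hx ((isIn_singleton_iff_mem x _).mp hc)
    have h10 : PySem.Chars.isIn [x] "aeiouAEIOU".toList = false := by
      rw [Bool.eq_false_iff]; intro hc
      have hm := (isIn_singleton_iff_mem x _).mp hc
      simp at hm hx
      rcases hm with h1 | h1 | h1 | h1 | h1 | h1 | h1 | h1 | h1 | h1 <;> subst h1 <;> tauto
    rw [h5, h10]

theorem isIn_transfer (c : Char) (hc : PySem.Chars.isupper c = true) :
    PySem.Chars.isIn [PySem.Chars.lowerChar c] "aeiou".toList
      = PySem.Chars.isIn [c] "aeiouAEIOU".toList := by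
  by_cases hm : c ∈ "aeiouAEIOU".toList
  · simp at hm
    rcases hm with h1 | h1 | h1 | h1 | h1 | h1 | h1 | h1 | h1 | h1 <;> subst h1 <;>
      first | (exact absurd hc (by decide)) | decide
  · have r1 : PySem.Chars.isIn [c] "aeiouAEIOU".toList = false :=
      Bool.eq_false_iff.mpr (fun hcon => hm ((isIn_singleton_iff_mem _ _).mp hcon))
    have r2 : PySem.Chars.isIn [PySem.Chars.lowerChar c] "aeiou".toList = false := by
      rw [Bool.eq_false_iff]; intro hcon
      have hmem := (isIn_singleton_iff_mem _ _).mp hcon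
      have hcu := upperChar_lowerChar c hc
      apply hm
      simp at hmem ⊢
      rcases hmem with h1 | h1 | h1 | h1 | h1 <;> rw [h1] at hcu <;> rw [← hcu] <;> decide
    rw [r1, r2]

theorem foldA (l : List Char) :
    l.foldl (fun acc w =>
      if PySem.Chars.isIn [w] "aeiouAEIOU".toList then acc ++ [['u', 'b', PySem.Chars.lowerChar w]]
      else acc ++ [[w]]) [] = l.map fA := by
  have hfun : (fun (acc : List (List Char)) w =>
      if PySem.Chars.isIn [w] "aeiouAEIOU".toList then acc ++ [['u', 'b', PySem.Chars.lowerChar w]]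
      else acc ++ [[w]]) = fun acc w => acc ++ [fA w] := by
    funext acc w; unfold fA; split <;> rfl
  rw [hfun, PySem.List.foldl_append_singleton_eq_map]; rfl

theorem not_upper_of_pyStrIslower (rest : List Char) (hs : pyStrIslower rest = true) :
    ∀ x ∈ rest, PySem.Chars.isupper x = false := by
  intro x hx
  rw [pyStrIslower, Bool.and_eq_true] at hs
  have hall := hs.2
  rw [List.all_eq_true] at hall
  have hthis := hall x hx
  by_contra hcon
  rw [Bool.not_eq_false] at hcon
  have hl := islower_of_isupper x hcon
  simp [PySem.Chars.isalpha, hcon, hl] at hthis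

-- ===== VERDICT (by name: the statement is the Claim_ definition above) =====
theorem upper_ubbi_dubbi_spec : Claim_equal_upper_ubbi_dubbi := by
  intro words _ hpre
  unfold Spec_upper_ubbi_dubbi upper_ubbi_dubbi upper_ubbi_dubbi_alt
  cases hL : words.toList with
  | nil => exact absurd (String.toList_eq_nil_iff.mp hL) hpre
  | cons c rest =>
    by_cases hg : (PySem.Chars.isupper c &&
        pyStrIslower (PySem.List.slice (c :: rest) (some 1) none)) = true
    · have hsl : PySem.List.slice (c :: rest) (some 1) none = rest := by
        simp [pysem]
      have hg2 := hg
      rw [Bool.and_eq_true] at hg2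
      obtain ⟨hc, hs⟩ := hg2
      rw [hsl] at hs
      have hrest := not_upper_of_pyStrIslower rest hs
      have htail : rest.map fA = rest.map fB :=
        List.map_congr_left (fun x hx => fA_eq_fB_of_not_upper x (hrest x hx))
      have hmaplow : rest.map PySem.Chars.lowerChar = rest := by
        rw [List.map_congr_left (fun x hx => lowerChar_id_of_not_upper x (hrest x hx))]
        simp
      simp only [hg, if_true, foldA, join_nil_flatten, staged_eq_flatMap, PySem.Chars.lower,
        List.map_cons, hmaplow, List.flatten_cons, List.flatMap_cons]
      have hflat : rest.flatMap fB = (rest.map fB).flatten := by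
        simp [List.flatMap_def]
      by_cases h10 : PySem.Chars.isIn [c] "aeiouAEIOU".toList = true
      · have hA : fA c = ['u', 'b', PySem.Chars.lowerChar c] := by unfold fA; rw [if_pos h10]
        have hB : fB (PySem.Chars.lowerChar c) = ['u', 'b', PySem.Chars.lowerChar c] := by
          unfold fB; rw [if_pos (by rw [isIn_transfer c hc]; exact h10)]
        have hu : PySem.Chars.islower 'u' = true := by decide
        rw [htail, hA, hB, hflat]
        simp [List.cons_append, hu]
      · have hA : fA c = [c] := by unfold fA; rw [if_neg h10]
        have hB : fB (PySem.Chars.lowerChar c) = [PySem.Chars.lowerChar c] := by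
          unfold fB
          rw [if_neg (by rw [isIn_transfer c hc]; exact h10)]
        rw [htail, hA, hB, hflat]
        simp [List.cons_append, islower_of_isupper c hc, upperChar_lowerChar c hc]
    · simp [hg]
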